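-- pv_equiv track=rewrite | github.com/ak1376/PRS_Portability | snakemake_scripts/extract_transformer_embeddings.py | _choose_windows
-- ===== SOURCE A (Python) =====
-- def _choose_windows(L_total: int, window_len: int) -> list[tuple[int, int]]:
--     if window_len <= 0:
--         raise ValueError("window_len must be > 0")
--     if window_len >= L_total:
--         return [(0, L_total)]
--
--     starts = list(range(0, L_total, window_len))
--     windows = []
--     for s in starts:
--         e = s + window_len
--         if e <= L_total:
--             windows.append((s, e))
--         else:
--             windows.append((L_total - window_len, L_total))
--             break
--     windows = sorted(set(windows))
--     return windows
-- ===== SOURCE B (Python) =====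
-- def _choose_windows(L_total: int, window_len: int) -> list[tuple[int, int]]:
--     if window_len <= 0:
--         raise ValueError("window_len must be > 0")
--     if window_len >= L_total:
--         return [(0, L_total)]
--
--     windows = []
--     floor_end = L_total - L_total % window_len
--     if floor_end != L_total:
--         windows.append((L_total - window_len, L_total))
--     e = floor_end
--     while e > 0:
--         windows.append((e - window_len, e))
--         e -= window_len
--     windows.reverse()
--     return windows
-- ===== Notes on version B (the rewrite author's own statement) =====
-- stated objective: alternative
-- what changed: Builds the window list back-to-front: the clamped tail window (present iff L_total % window_len != 0) is placed first, the full windows are appended by walking end boundaries downward from L_total - L_total % window_len to 0, and a single final reverse yields the result - replacing A's forward range scan with break followed by a sorted(set(...)) cleanup pass.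
import Mathlib
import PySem

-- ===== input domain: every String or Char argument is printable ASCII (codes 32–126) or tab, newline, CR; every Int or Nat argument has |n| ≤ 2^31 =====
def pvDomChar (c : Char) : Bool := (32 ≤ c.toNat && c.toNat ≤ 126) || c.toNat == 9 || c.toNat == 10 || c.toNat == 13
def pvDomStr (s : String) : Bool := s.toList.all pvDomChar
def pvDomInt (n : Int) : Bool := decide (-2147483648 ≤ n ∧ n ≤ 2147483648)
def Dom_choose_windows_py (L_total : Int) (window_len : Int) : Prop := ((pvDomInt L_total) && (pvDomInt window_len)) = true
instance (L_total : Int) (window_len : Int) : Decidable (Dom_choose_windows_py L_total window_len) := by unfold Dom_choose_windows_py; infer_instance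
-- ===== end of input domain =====

-- B builds the window list back-to-front (clamped tail first iff the remainder is nonzero,
-- then full windows by walking end boundaries downward, one final reverse) instead of A's
-- forward range scan with break plus the sorted(set(…)) cleanup.

-- ===== PORT A =====
-- the 'for s in starts' loop with its break, accumulating 'windows'
def chooseLoop (L w : Int) : List Int → List (Int × Int) → List (Int × Int)
  | [], windows => windows
  | s :: rest, windows =>
      if s + w ≤ L then chooseLoop L w rest (windows ++ [(s, s + w)])
      else windows ++ [(L - w, L)]

def choose_windows_py (L_total : Int) (window_len : Int) : List (Int × Int) :=
  if window_len ≤ 0 then []    -- Python raises ValueError here; excluded by Pre_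
  else if window_len ≥ L_total then [(0, L_total)]
  else
    let starts := PySem.List.pyRange 0 L_total window_len
    let windows := chooseLoop L_total window_len starts []
    PySem.List.sorted2 (PySem.Set.ofList windows) (fun p => p.1) (fun p => p.2) false

-- ===== PORT B =====
-- the 'while e > 0' loop of Source B, appending (e - w, e) and stepping e down by w;
-- the '0 < w' conjunct only makes the recursion total (B only calls it with 0 < w)
def backLoop (w : Int) (e : Int) (windows : List (Int × Int)) : List (Int × Int) :=
  if _h : 0 < e ∧ 0 < w then backLoop w (e - w) (windows ++ [(e - w, e)]) else windows
termination_by e.toNat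
decreasing_by omega

def choose_windows_py_alt (L_total : Int) (window_len : Int) : List (Int × Int) :=
  if window_len ≤ 0 then []    -- Python raises ValueError here; excluded by Pre_
  else if window_len ≥ L_total then [(0, L_total)]
  else
    let floor_end := L_total - PySem.Int.mod L_total window_len
    let windows : List (Int × Int) :=
      if floor_end ≠ L_total then [(L_total - window_len, L_total)] else []
    (backLoop window_len floor_end windows).reverse

-- ===== PRECONDITION & SPEC =====
-- A raises ValueError when window_len <= 0; both programs return on every other input.
def Pre_choose_windows_py (_L_total : Int) (window_len : Int) : Prop := 1 ≤ window_len
instance (L_total : Int) (window_len : Int) : Decidable (Pre_choose_windows_py L_total window_len) := by unfold Pre_choose_windows_py; infer_instance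
def pvWitness_choose_windows_py : Int × Int := (10, 3)

def Spec_choose_windows_py (L_total : Int) (window_len : Int) (out : List (Int × Int)) : Prop := out = choose_windows_py_alt L_total window_len
instance (L_total : Int) (window_len : Int) (out : List (Int × Int)) : Decidable (Spec_choose_windows_py L_total window_len out) := by unfold Spec_choose_windows_py; infer_instance

-- ===== CLAIM (what is proved, stated in full; the proofs are below) =====
def Claim_equal_choose_windows_py : Prop := ∀ (L_total : Int) (window_len : Int), Dom_choose_windows_py L_total window_len → Pre_choose_windows_py L_total window_len → Spec_choose_windows_py L_total window_len (choose_windows_py L_total window_len)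

-- ===== LEMMAS AND PROOFS =====

-- an insertion sort with a two-component key is the identity on a list whose first key is strictly increasing
theorem sorted2_eq_self_of_pairwise_fst_lt (W : List (Int × Int))
    (h : W.Pairwise (fun a b => a.1 < b.1)) :
    PySem.List.sorted2 W (fun p => p.1) (fun p => p.2) false = W := by
  induction W using List.reverseRecOn with
  | nil => rfl
  | append_singleton W' x ih =>
    rcases List.pairwise_append.mp h with ⟨h1, _, h3⟩
    show List.foldl (fun acc y => PySem.List.insertBy
        (fun a b => decide (a.1 < b.1) || (!decide (b.1 < a.1) && decide (a.2 < b.2))) y acc)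
        [] (W' ++ [x]) = W' ++ [x]
    rw [List.foldl_append]
    have ihW : List.foldl (fun acc y => PySem.List.insertBy
        (fun a b => decide (a.1 < b.1) || (!decide (b.1 < a.1) && decide (a.2 < b.2))) y acc)
        [] W' = W' := ih h1
    rw [ihW]
    simp only [List.foldl_cons, List.foldl_nil]
    apply PySem.List.insertBy_of_forall_not_before
    intro y hy
    have : y.1 < x.1 := h3 y hy x (List.mem_singleton_self x)
    simp [not_lt.mpr (le_of_lt this), this]

-- A's loop when no start overshoots: it appends every full window
theorem chooseLoop_all_full (L w : Int) (ss : List Int) (acc : List (Int × Int))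
    (h : ∀ s ∈ ss, s + w ≤ L) :
    chooseLoop L w ss acc = acc ++ ss.map (fun s => (s, s + w)) := by
  induction ss generalizing acc with
  | nil => simp [chooseLoop]
  | cons s rest ih =>
    have hs : s + w ≤ L := h s (by simp)
    simp only [chooseLoop, if_pos hs]
    rw [ih _ (fun t ht => h t (List.mem_cons_of_mem _ ht))]
    simp

-- A's loop when a start overshoots: full windows, then the clamped window, then break
theorem chooseLoop_break (L w : Int) (ss : List Int) (t : Int) (rest : List Int)
    (acc : List (Int × Int)) (h : ∀ s ∈ ss, s + w ≤ L) (ht : ¬ (t + w ≤ L)) :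
    chooseLoop L w (ss ++ t :: rest) acc
      = acc ++ ss.map (fun s => (s, s + w)) ++ [(L - w, L)] := by
  induction ss generalizing acc with
  | nil => simp [chooseLoop, if_neg ht]
  | cons s ss' ih =>
    have hs : s + w ≤ L := h s (by simp)
    simp only [List.cons_append, chooseLoop, if_pos hs]
    rw [ih _ (fun u hu => h u (List.mem_cons_of_mem _ hu))]
    simp

theorem pairwise_fst_lt_full (w : Int) (hw : 0 < w) (n : Nat) :
    ((List.range n).map (fun k : Nat => (w * (k : Int), w * (k : Int) + w))).Pairwise
      (fun a b => a.1 < b.1) := by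
  refine List.pairwise_map.mpr ((List.pairwise_lt_range (n := n)).imp ?_)
  intro a b hab
  have h : (a : Int) < (b : Int) := by exact_mod_cast hab
  simpa using (mul_lt_mul_of_pos_left h hw)

-- B's loop, characterised: starting at e = w * n it prepends (builds, in append order,
-- the descending list of) the n full windows
theorem backLoop_eq (w : Int) (hw : 0 < w) (n : Nat) (acc : List (Int × Int)) :
    backLoop w (w * (n : Int)) acc
      = acc ++ (List.range n).reverse.map
          (fun k : Nat => (w * (k : Int), w * (k : Int) + w)) := by
  induction n generalizing acc with
  | zero => rw [backLoop]; simp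
  | succ m ih =>
    have hpos : 0 < w * ((m + 1 : Nat) : Int) := by positivity
    rw [backLoop, dif_pos ⟨hpos, hw⟩]
    have he : w * ((m + 1 : Nat) : Int) - w = w * ((m : Nat) : Int) := by push_cast; ring
    rw [he, ih]
    rw [List.range_succ, List.reverse_append, List.map_append]
    simp only [List.reverse_singleton, List.map_cons, List.map_nil]
    have : w * ((m + 1 : Nat) : Int) = w * ((m : Nat) : Int) + w := by push_cast; ring
    rw [this]
    simp

theorem choose_windows_py_spec' (L w : Int) (hw : 1 ≤ w) :
    choose_windows_py L w = choose_windows_py_alt L w := by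
  by_cases hge : w ≥ L
  · simp [choose_windows_py, choose_windows_py_alt, hge, (show ¬ w ≤ 0 by omega)]
  · -- 0 < w < L
    have hw0 : (0 : Int) < w := by omega
    have hLw : w < L := lt_of_not_ge hge
    have hL0 : (0 : Int) < L := by omega
    set q := L.fdiv w with hq
    set r := L.fmod w with hr
    have hqe : q = L / w := by rw [hq, Int.fdiv_eq_ediv_of_nonneg _ (le_of_lt hw0)]
    have hre : r = L % w := by
      rw [hr, Int.fmod_eq_emod, if_pos (Or.inl (le_of_lt hw0)), add_zero]
    have hdm := Int.mul_ediv_add_emod L w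
    have hsplit : L = q * w + r := by rw [hqe, hre]; linarith
    have hr0 : 0 ≤ r := by rw [hre]; exact Int.emod_nonneg _ (by omega)
    have hrw : r < w := by rw [hre]; exact Int.emod_lt_of_pos _ hw0
    have hq1 : 1 ≤ q := by nlinarith
    -- the list of starts
    have hstarts : PySem.List.pyRange 0 L w
        = (List.range ((L + w - 1) / w).toNat).map (fun k : Nat => w * (k : Int)) := by
      rw [PySem.List.pyRange_of_pos 0 L hw0, if_pos hL0, sub_zero]
      refine List.map_congr_left ?_
      intro k _
      ring
    have hcount : (L + w - 1) / w = if r = 0 then q else q + 1 := by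
      by_cases h0 : r = 0
      · have e0 : L + w - 1 = (w - 1) + q * w := by
          have hL : L = q * w := by omega
          linarith
        rw [if_pos h0, e0, Int.add_mul_ediv_right _ _ (by omega : w ≠ 0),
          Int.ediv_eq_zero_of_lt (by omega) (by omega), zero_add]
      · have e1 : (q + 1) * w = q * w + w := by ring
        have e0 : L + w - 1 = (r - 1) + (q + 1) * w := by linarith
        rw [if_neg h0, e0, Int.add_mul_ediv_right _ _ (by omega : w ≠ 0),
          Int.ediv_eq_zero_of_lt (by omega) (by omega), zero_add]
    -- B's result, rewritten over List.range
    have hfe : L - PySem.Int.mod L w = w * ((q.toNat : Nat) : Int) := by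
      show L - r = w * ((q.toNat : Nat) : Int)
      have : ((q.toNat : Nat) : Int) = q := by omega
      rw [this]; linarith
    have halt : choose_windows_py_alt L w
        = if r ≠ 0
          then (List.range q.toNat).map (fun k : Nat => (w * (k : Int), w * (k : Int) + w))
                ++ [(L - w, L)]
          else (List.range q.toNat).map (fun k : Nat => (w * (k : Int), w * (k : Int) + w)) := by
      simp only [choose_windows_py_alt, if_neg (show ¬ w ≤ 0 by omega), if_neg hge]
      rw [hfe]
      have hwq : w * ((q.toNat : Nat) : Int) = L - r := by
        have hqq : ((q.toNat : Nat) : Int) = q := by omega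
        rw [hqq, mul_comm]; linarith
      by_cases h0 : r = 0
      · rw [if_neg (by rw [hwq]; omega), if_neg (by simp [h0])]
        rw [backLoop_eq w hw0 q.toNat []]
        simp
      · rw [if_pos (by rw [hwq]; omega), if_pos h0]
        rw [backLoop_eq w hw0 q.toNat [(L - w, L)]]
        simp
    have hA : choose_windows_py L w
        = PySem.List.sorted2
            (PySem.Set.ofList (chooseLoop L w (PySem.List.pyRange 0 L w) []))
            (fun p => p.1) (fun p => p.2) false := by
      simp only [choose_windows_py, if_neg (show ¬ w ≤ 0 by omega), if_neg hge]
    rw [hA, halt, hstarts, hcount]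
    by_cases h0 : r = 0
    · -- exact fit: no break, q full windows
      rw [if_pos h0, if_neg (by simp [h0])]
      have hall : ∀ s ∈ (List.range q.toNat).map (fun k : Nat => w * (k : Int)), s + w ≤ L := by
        intro s hs
        rcases List.mem_map.mp hs with ⟨k, hk, rfl⟩
        have hkq : (k : Int) < q := by
          have := List.mem_range.mp hk
          omega
        nlinarith [mul_le_mul_of_nonneg_left (show (k : Int) + 1 ≤ q by omega) (le_of_lt hw0)]
      rw [chooseLoop_all_full _ _ _ _ hall, List.nil_append, List.map_map]
      have hmaps : (List.range q.toNat).map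
          ((fun s => (s, s + w)) ∘ (fun k : Nat => w * (k : Int)))
          = (List.range q.toNat).map (fun k : Nat => (w * (k : Int), w * (k : Int) + w)) := rfl
      rw [hmaps]
      have hpw := pairwise_fst_lt_full w hw0 q.toNat
      rw [PySem.Set.ofList_eq_self_of_nodup _
        (hpw.imp (fun {a b} h => fun hc => by rw [hc] at h; exact lt_irrefl _ h))]
      exact sorted2_eq_self_of_pairwise_fst_lt _ hpw
    · -- remainder: q full windows then the clamped window
      rw [if_neg h0, if_pos h0]
      have hqt : (q + 1).toNat = q.toNat + 1 := by omega
      rw [hqt, List.range_succ, List.map_append, List.map_singleton]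
      have hall : ∀ s ∈ (List.range q.toNat).map (fun k : Nat => w * (k : Int)), s + w ≤ L := by
        intro s hs
        rcases List.mem_map.mp hs with ⟨k, hk, rfl⟩
        have hkq : (k : Int) < q := by
          have := List.mem_range.mp hk
          omega
        nlinarith [mul_le_mul_of_nonneg_left (show (k : Int) + 1 ≤ q by omega) (le_of_lt hw0)]
      have hbig : ¬ (w * (q.toNat : Int) + w ≤ L) := by
        have hqq : (q.toNat : Int) = q := by omega
        rw [hqq]
        nlinarith
      rw [chooseLoop_break _ _ _ _ _ _ hall hbig, List.nil_append, List.map_map]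
      have hmaps : (List.range q.toNat).map
          ((fun s => (s, s + w)) ∘ (fun k : Nat => w * (k : Int)))
          = (List.range q.toNat).map (fun k : Nat => (w * (k : Int), w * (k : Int) + w)) := rfl
      rw [hmaps]
      have hpw : ((List.range q.toNat).map
          (fun k : Nat => (w * (k : Int), w * (k : Int) + w)) ++ [((L - w : Int), L)]).Pairwise
          (fun a b => a.1 < b.1) := by
        rw [List.pairwise_append]
        refine ⟨pairwise_fst_lt_full w hw0 q.toNat, List.pairwise_singleton _ _, ?_⟩
        intro a ha b hb
        rcases List.mem_map.mp ha with ⟨k, hk, rfl⟩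
        rcases List.mem_singleton.mp hb with rfl
        have hkq : (k : Int) < q := by
          have := List.mem_range.mp hk
          omega
        have hr1 : 1 ≤ r := by omega
        show w * (k : Int) < L - w
        nlinarith [mul_le_mul_of_nonneg_left (show (k : Int) ≤ q - 1 by omega) (le_of_lt hw0)]
      rw [PySem.Set.ofList_eq_self_of_nodup _
        (hpw.imp (fun {a b} h => fun hc => by rw [hc] at h; exact lt_irrefl _ h))]
      exact sorted2_eq_self_of_pairwise_fst_lt _ hpw

-- ===== VERDICT (by name: the statement is the Claim_ definition above) =====
theorem choose_windows_py_spec : Claim_equal_choose_windows_py := by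
  intro L w _ hpre
  unfold Spec_choose_windows_py
  exact choose_windows_py_spec' L w hpre
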